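-- pv_equiv track=rewrite | github.com/aknowel/Roulette | src/roulette.py | consecutive_search
-- ===== SOURCE A (Python) =====
-- def consecutive_search(numbers: list, allowed: list, reverse=False):
--     result = list()
--     if not reverse:
--         for i in numbers[::-1]:
--             if i in allowed:
--                 result.append(i)
--             else:
--                 break
--     else:
--         for i in numbers[::-1]:
--             if i in allowed:
--                 result.append(i)
--             else:
--                 break
--     return result
-- ===== SOURCE B (Python) =====
-- def consecutive_search(numbers: list, allowed: list, reverse=False):
--     allowed_set = set(allowed)
--     cut = 0
--     for idx, x in enumerate(numbers):
--         if x not in allowed_set: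
--             cut = idx + 1
--     return numbers[cut:][::-1]
-- ===== Notes on version B (the rewrite author's own statement) =====
-- stated objective: alternative
-- what changed: Replaces the reverse-and-break accumulation loop with a forward scan over a prebuilt membership set that computes the boundary index past the last disallowed element, then returns the reversed suffix slice numbers[cut:][::-1].
import Mathlib
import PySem

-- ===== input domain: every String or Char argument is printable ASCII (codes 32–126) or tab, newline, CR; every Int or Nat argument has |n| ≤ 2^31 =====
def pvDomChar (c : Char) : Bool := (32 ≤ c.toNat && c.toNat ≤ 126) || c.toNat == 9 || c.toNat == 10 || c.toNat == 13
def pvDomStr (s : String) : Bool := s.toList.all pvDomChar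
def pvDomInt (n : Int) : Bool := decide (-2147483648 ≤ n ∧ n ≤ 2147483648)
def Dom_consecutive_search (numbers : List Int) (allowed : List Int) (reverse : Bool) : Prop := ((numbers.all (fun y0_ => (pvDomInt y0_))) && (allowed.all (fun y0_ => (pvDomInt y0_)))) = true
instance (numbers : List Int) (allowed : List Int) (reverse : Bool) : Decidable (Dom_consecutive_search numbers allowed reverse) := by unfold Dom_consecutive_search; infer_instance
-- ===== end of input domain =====

-- B replaces A's accumulate-until-break pass over the reversed list by a forward scan that
-- computes the boundary index past the last disallowed element, then slices and reverses
-- (objective: alternative decomposition, same cost).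

-- ===== PORT A =====
-- the for-loop with break: append while `i in allowed`, stop at the first element not allowed
def pvLoopA (l : List Int) (allowed : List Int) (result : List Int) : List Int :=
  match l with
  | [] => result
  | i :: rest => if allowed.contains i then pvLoopA rest allowed (result ++ [i]) else result

-- A's two branches are textually identical in the source; the port keeps the if.
-- numbers[::-1] is exactly List.reverse.
def consecutive_search (numbers : List Int) (allowed : List Int) (reverse : Bool) : List Int :=
  if !reverse then pvLoopA numbers.reverse allowed []
  else pvLoopA numbers.reverse allowed []

-- ===== PORT B =====
-- cut = index just past the last element of numbers that is NOT in allowed_set (0 if none)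
def pvCutB (numbers : List Int) (allowed : List Int) : Int :=
  let allowed_set := PySem.Set.ofList allowed
  (PySem.List.enumerate numbers).foldl
    (fun cut p => if !(PySem.Set.contains allowed_set p.2) then p.1 + 1 else cut) 0

-- numbers[cut:][::-1]
def consecutive_search_alt (numbers : List Int) (allowed : List Int) (reverse : Bool) : List Int :=
  (PySem.List.slice numbers (some (pvCutB numbers allowed)) none).reverse

-- ===== PRECONDITION & SPEC =====
def Spec_consecutive_search (numbers : List Int) (allowed : List Int) (reverse : Bool) (out : List Int) : Prop := out = consecutive_search_alt numbers allowed reverse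
instance (numbers : List Int) (allowed : List Int) (reverse : Bool) (out : List Int) : Decidable (Spec_consecutive_search numbers allowed reverse out) := by unfold Spec_consecutive_search; infer_instance

-- ===== CLAIM (what is proved, stated in full; the proofs are below) =====
def Claim_equal_consecutive_search : Prop := ∀ (numbers : List Int) (allowed : List Int) (reverse : Bool), Dom_consecutive_search numbers allowed reverse → Spec_consecutive_search numbers allowed reverse (consecutive_search numbers allowed reverse)

-- ===== LEMMAS AND PROOFS =====

-- A's loop appends: it returns the accumulator followed by the allowed prefix (takeWhile).
lemma pvLoopA_eq_takeWhile (l allowed res : List Int) :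
    pvLoopA l allowed res = res ++ l.takeWhile (fun i => decide (i ∈ allowed)) := by
  induction l generalizing res with
  | nil => simp [pvLoopA]
  | cons i rest ih =>
    by_cases h : i ∈ allowed <;>
      simp [pvLoopA, h, ih]

-- Nat-valued form of B's cut: length minus the length of the allowed suffix.
def pvCutN (numbers : List Int) (allowed : List Int) : Nat :=
  numbers.length - (numbers.reverse.takeWhile (fun i => decide (i ∈ allowed))).length

lemma enumerate_append_singleton (xs : List Int) (x : Int) (k : Int) :
    PySem.List.enumerate (xs ++ [x]) k
      = PySem.List.enumerate xs k ++ [(k + xs.length, x)] := by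
  induction xs generalizing k with
  | nil => simp [PySem.List.enumerate]
  | cons y ys ih =>
    simp [PySem.List.enumerate, ih]
    ring_nf

lemma pvCutB_eq_cutN (numbers allowed : List Int) :
    pvCutB numbers allowed = ((pvCutN numbers allowed : Nat) : Int) := by
  induction numbers using List.reverseRecOn with
  | nil => simp [pvCutB, pvCutN, PySem.List.enumerate]
  | append_singleton xs x ih =>
    have htw : (xs.reverse.takeWhile (fun i => decide (i ∈ allowed))).length ≤ xs.length := by
      have := (List.takeWhile_sublist (l := xs.reverse)
        (p := fun i => decide (i ∈ allowed))).length_le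
      simpa using this
    unfold pvCutB at *
    rw [enumerate_append_singleton, List.foldl_append]
    unfold pvCutN
    by_cases h : x ∈ allowed
    · simp only [pvCutN] at ih
      simp at ih
      simp [h, ih]
    · simp [h]

lemma takeWhile_eq_take_length {α : Type} (p : α → Bool) (xs : List α) :
    xs.take (xs.takeWhile p).length = xs.takeWhile p := by
  induction xs with
  | nil => simp
  | cons y ys ih =>
    by_cases h : p y = true <;> simp [h, ih]

-- ===== VERDICT (by name: the statement is the Claim_ definition above) =====
theorem consecutive_search_spec : Claim_equal_consecutive_search := by
  intro numbers allowed reverse _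
  unfold Spec_consecutive_search consecutive_search consecutive_search_alt
  rw [pvCutB_eq_cutN, PySem.List.slice_from_natCast]
  have hdrop : numbers.drop (pvCutN numbers allowed)
      = (numbers.reverse.takeWhile (fun i => decide (i ∈ allowed))).reverse := by
    have := List.take_reverse (xs := numbers)
      (i := (numbers.reverse.takeWhile (fun i => decide (i ∈ allowed))).length)
    -- numbers.reverse.take tw = (numbers.drop (len - tw)).reverse
    have h2 : numbers.reverse.take (numbers.reverse.takeWhile (fun i => decide (i ∈ allowed))).length
        = (numbers.drop (pvCutN numbers allowed)).reverse := by
      simpa [pvCutN] using this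
    have h3 := takeWhile_eq_take_length (fun i => decide (i ∈ allowed)) numbers.reverse
    rw [h3] at h2
    calc numbers.drop (pvCutN numbers allowed)
        = (numbers.drop (pvCutN numbers allowed)).reverse.reverse := by simp
      _ = (numbers.reverse.takeWhile (fun i => decide (i ∈ allowed))).reverse := by rw [← h2]
  rw [hdrop, List.reverse_reverse]
  cases reverse <;> simp [pvLoopA_eq_takeWhile]
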